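-- pv_equiv track=rewrite | github.com/ratara5/Python-Katas-Codesignal | proof 2232022.py | solution
-- ===== SOURCE A (Python) =====
-- def solution(a):
--     dist=[9999]
--     new=-1
--     for i in range(0,len(a)):
--         if a[i] in a[i+1:]:
--             d=a[i+1:].index(a[i])+1
--             if d<min(dist):
--                 new=a[i]
--             dist.append(d)
--     return new
-- ===== SOURCE B (Python) =====
-- def solution(a):
--     # Single right-to-left pass: nxt[v] = nearest index > i holding v, so each
--     # consecutive equal pair is seen once.  "<=" makes the leftmost pair win a
--     # tie, as in A; only gaps below A's 9999 bound count, hence the 9998 start.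
--     nxt = {}
--     best = 9998
--     ans = -1
--     for i in reversed(range(len(a))):
--         v = a[i]
--         if v in nxt:
--             gap = nxt[v] - i
--             if gap <= best:
--                 best = gap
--                 ans = v
--         nxt[v] = i
--     return ans
-- ===== Notes on version B (the rewrite author's own statement) =====
-- stated objective: faster
-- what changed: A rescans the suffix a[i+1:] for every index (membership test plus .index plus min over the growing dist list); B makes one right-to-left pass keeping a dictionary of each value's nearest next occurrence and folds the running minimum gap, with <= so the leftmost minimal pair wins exactly as in A.
import Mathlib
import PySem

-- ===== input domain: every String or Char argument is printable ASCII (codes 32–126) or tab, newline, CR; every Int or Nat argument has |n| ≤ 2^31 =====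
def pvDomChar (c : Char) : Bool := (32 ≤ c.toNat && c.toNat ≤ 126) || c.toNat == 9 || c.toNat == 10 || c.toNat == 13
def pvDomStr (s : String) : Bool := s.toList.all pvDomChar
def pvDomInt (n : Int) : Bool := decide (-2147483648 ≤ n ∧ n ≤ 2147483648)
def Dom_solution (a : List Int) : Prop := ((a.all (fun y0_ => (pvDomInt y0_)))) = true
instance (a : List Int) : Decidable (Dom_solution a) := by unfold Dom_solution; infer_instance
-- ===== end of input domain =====

-- B replaces A's quadratic scan by one right-to-left pass with a dictionary of
-- nearest next occurrences (objective: faster, O(n^2) -> O(n)).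

-- ===== PORT A =====
-- loop body of A: s = (dist, new), i the loop index
def stepA (a : List Int) (s : List Int × Int) (i : Int) : List Int × Int :=
  let ai := PySem.List.pyGetD a i 0                     -- a[i] (i always in range)
  let tl := PySem.List.slice a (some (i + 1)) none      -- a[i+1:]
  if tl.contains ai then                                -- a[i] in a[i+1:]
    let d : Int := (((PySem.List.index? tl ai).getD 0 : Nat) : Int) + 1
    (s.1 ++ [d],
     if d < (PySem.List.min? s.1 (fun x => x)).getD 0 then ai else s.2)
  else s

def solution (a : List Int) : Int :=
  ((PySem.List.pyRange 0 (a.length : Int) 1).foldl (stepA a) ([9999], -1)).2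

-- ===== PORT B =====
-- loop body of B: s = (nxt, best, ans), i the loop index
def stepB (a : List Int) (s : PySem.Dict Int Int × Int × Int) (i : Int) :
    PySem.Dict Int Int × Int × Int :=
  let v := PySem.List.pyGetD a i 0                      -- a[i] (i always in range)
  let t : Int × Int :=
    if s.1.contains v then
      let gap := s.1.getD v 0 - i                       -- nxt[v] - i (key present)
      if gap ≤ s.2.1 then (gap, v) else s.2
    else s.2
  (s.1.insert v i, t)

def solution_alt (a : List Int) : Int :=
  (((PySem.List.pyRange 0 (a.length : Int) 1).reverse).foldl (stepB a)
    (PySem.Dict.empty, 9998, -1)).2.2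

-- ===== PRECONDITION & SPEC =====
def Spec_solution (a : List Int) (out : Int) : Prop := out = solution_alt a
instance (a : List Int) (out : Int) : Decidable (Spec_solution a out) := by unfold Spec_solution; infer_instance

-- ===== CLAIM (what is proved, stated in full; the proofs are below) =====
def Claim_equal_solution : Prop := ∀ (a : List Int), Dom_solution a → Spec_solution a (solution a)

-- ===== LEMMAS AND PROOFS =====

-- record-min step functions: state (current min, current answer), pair (gap, value)
def step_lt (s p : Int × Int) : Int × Int := if p.1 < s.1 then p else s
def step_le (s p : Int × Int) : Int × Int := if p.1 ≤ s.1 then p else s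

-- the (gap, value) pair contributed by index k: gap to the next equal occurrence
def gp (a : List Int) (k : Nat) : Option (Int × Int) :=
  match PySem.List.index? (a.drop (k + 1)) (a.getD k 0) with
  | some t => some ((t : Int) + 1, a.getD k 0)
  | none => none

-- all pairs, in order of the left endpoint
def pgaps (a : List Int) : List (Int × Int) := (List.range a.length).filterMap (gp a)

-- running minimum of the gaps, seeded with m
def fmins (L : List (Int × Int)) (m : Int) : Int := L.foldl (fun x p => min x p.1) m

-- value of the first pair with gap g (default v)
def fv (L : List (Int × Int)) (g : Int) (v : Int) : Int :=
  match L.find? (fun p => p.1 == g) with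
  | some q => q.2
  | none => v

theorem fmins_append (L L' : List (Int × Int)) (m : Int) :
    fmins (L ++ L') m = fmins L' (fmins L m) := by
  simp [fmins, List.foldl_append]

theorem fmins_le_init (L : List (Int × Int)) (m : Int) : fmins L m ≤ m := by
  induction L generalizing m with
  | nil => simp [fmins]
  | cons p T ih =>
      have h := ih (min m p.1)
      simp only [fmins, List.foldl_cons] at h ⊢
      exact le_trans h (min_le_left _ _)

theorem fmins_le_mem (L : List (Int × Int)) (m : Int) {p : Int × Int} (hp : p ∈ L) :
    fmins L m ≤ p.1 := by
  induction L generalizing m with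
  | nil => cases hp
  | cons q T ih =>
      rcases List.mem_cons.mp hp with h | h
      · subst h
        exact le_trans (fmins_le_init T (min m p.1)) (min_le_right _ _)
      · exact ih _ h

theorem fmins_init_or_mem (L : List (Int × Int)) (m : Int) :
    fmins L m = m ∨ ∃ p ∈ L, fmins L m = p.1 := by
  induction L generalizing m with
  | nil => exact Or.inl rfl
  | cons q T ih =>
      rcases ih (min m q.1) with h | ⟨p, hp, he⟩
      · rcases le_total m q.1 with hle | hle
        · left; simpa [fmins, min_eq_left hle] using h
        · right; exact ⟨q, List.mem_cons_self, by simpa [fmins, min_eq_right hle] using h⟩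
      · right; exact ⟨p, List.mem_cons_of_mem _ hp, he⟩

theorem fmins_min (L : List (Int × Int)) (m x : Int) :
    fmins L (min m x) = min (fmins L m) x := by
  induction L generalizing m with
  | nil => simp [fmins]
  | cons p T ih =>
      simp only [fmins, List.foldl_cons] at ih ⊢
      rw [show min (min m x) p.1 = min (min m p.1) x by
            rw [min_assoc, min_comm x p.1, min_assoc],
          ih]

theorem fmins_reverse (L : List (Int × Int)) (m : Int) :
    fmins L.reverse m = fmins L m := by
  induction L generalizing m with
  | nil => rfl
  | cons p T ih =>
      rw [List.reverse_cons, fmins_append]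
      show min (fmins T.reverse m) p.1 = fmins (p :: T) m
      rw [ih]
      show min (fmins T m) p.1 = fmins T (min m p.1)
      rw [fmins_min]

theorem fold_lt_fst (L : List (Int × Int)) (m v : Int) :
    (L.foldl step_lt (m, v)).1 = fmins L m := by
  induction L generalizing m v with
  | nil => rfl
  | cons p T ih =>
      simp only [List.foldl_cons, step_lt, fmins]
      split
      · next h => rw [ih]; simp [fmins, min_eq_right (le_of_lt h)]
      · next h => rw [ih]; simp [fmins, min_eq_left (le_of_not_gt h)]

theorem fv_cons_ne {p : Int × Int} {g : Int} (T : List (Int × Int)) (v : Int)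
    (h : p.1 ≠ g) : fv (p :: T) g v = fv T g v := by
  unfold fv
  rw [List.find?_cons_of_neg (by simp [h])]

theorem fv_cons_self {p : Int × Int} {g : Int} (T : List (Int × Int)) (v : Int)
    (h : p.1 = g) : fv (p :: T) g v = p.2 := by
  unfold fv
  rw [List.find?_cons_of_pos (by simp [h])]

theorem fv_append (L1 L2 : List (Int × Int)) (g v : Int) :
    fv (L1 ++ L2) g v = fv L1 g (fv L2 g v) := by
  unfold fv
  rw [List.find?_append]
  cases h : L1.find? (fun p => p.1 == g) <;> simp

theorem fv_indep {T : List (Int × Int)} {g : Int} (hex : ∃ q ∈ T, q.1 = g)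
    (v v' : Int) : fv T g v = fv T g v' := by
  obtain ⟨q, hq, he⟩ := hex
  have hs : (T.find? (fun p => p.1 == g)).isSome := by
    rw [List.find?_isSome]
    exact ⟨q, hq, by simp [he]⟩
  unfold fv
  cases hfind : T.find? (fun p => p.1 == g) with
  | some r => rfl
  | none => rw [hfind] at hs; simp at hs

theorem fv_default {T : List (Int × Int)} {g : Int} (hno : ∀ q ∈ T, q.1 ≠ g)
    (v : Int) : fv T g v = v := by
  unfold fv
  rw [List.find?_eq_none.mpr (by intro q hq; simpa using hno q hq)]

theorem lt_snd (L : List (Int × Int)) (m v : Int) :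
    (L.foldl step_lt (m, v)).2 =
      if fmins L m < m then fv L (fmins L m) v else v := by
  induction L generalizing m v with
  | nil => simp [fmins]
  | cons p T ih =>
      simp only [List.foldl_cons, step_lt]
      have hm : fmins (p :: T) m = fmins T (min m p.1) := rfl
      by_cases h : p.1 < m
      · rw [if_pos h, ih]
        have hg : fmins (p :: T) m = fmins T p.1 := by
          rw [hm, min_eq_right (le_of_lt h)]
        rw [hg]
        have hle : fmins T p.1 ≤ p.1 := fmins_le_init T p.1
        rw [if_pos (lt_of_le_of_lt hle h)]
        by_cases hg2 : fmins T p.1 < p.1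
        · rw [if_pos hg2, fv_cons_ne T v (by omega)]
          obtain ⟨q, hq, he⟩ := (fmins_init_or_mem T p.1).resolve_left (by omega)
          exact fv_indep ⟨q, hq, he.symm⟩ p.2 v
        · rw [if_neg hg2, fv_cons_self T v (by omega)]
      · rw [if_neg h, ih]
        have hg : fmins (p :: T) m = fmins T m := by
          rw [hm, min_eq_left (le_of_not_gt h)]
        rw [hg]
        by_cases hc : fmins T m < m
        · rw [if_pos hc, if_pos hc, fv_cons_ne T v (by have := le_of_not_gt h; omega)]
        · rw [if_neg hc, if_neg hc]

theorem le_snd (L : List (Int × Int)) (m v : Int) :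
    (L.foldl step_le (m, v)).2 = fv L.reverse (fmins L m) v := by
  induction L generalizing m v with
  | nil => simp [fmins, fv]
  | cons p T ih =>
      simp only [List.foldl_cons, step_le, List.reverse_cons]
      have hm : fmins (p :: T) m = fmins T (min m p.1) := rfl
      by_cases h : p.1 ≤ m
      · rw [if_pos h]
        have hg : fmins (p :: T) m = fmins T p.1 := by
          rw [hm, min_eq_right h]
        rw [hg, ih, fv_append]
        have hle : fmins T p.1 ≤ p.1 := fmins_le_init T p.1
        by_cases hg2 : fmins T p.1 < p.1
        · rw [fv_cons_ne [] v (by omega), show fv [] (fmins T p.1) v = v from rfl]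
          obtain ⟨q, hq, he⟩ := (fmins_init_or_mem T p.1).resolve_left (by omega)
          exact (fv_indep ⟨q, List.mem_reverse.mpr hq, he.symm⟩ p.2 v)
        · rw [fv_cons_self [] v (by omega)]
      · rw [if_neg h]
        have hg : fmins (p :: T) m = fmins T m := by
          rw [hm, min_eq_left (le_of_not_ge h)]
        rw [hg, ih, fv_append]
        have : fmins T m ≤ m := fmins_le_init T m
        rw [fv_cons_ne [] v (by omega), show fv [] (fmins T m) v = v from rfl]

theorem A_inv (a : List Int) : ∀ (m : Nat), m ≤ a.length →
    (PySem.List.pyRange 0 (m : Int) 1).foldl (stepA a) ([9999], -1)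
      = (9999 :: (((List.range m).filterMap (gp a)).map Prod.fst),
         (((List.range m).filterMap (gp a)).foldl step_lt ((9999 : Int), -1)).2) := by
  intro m
  induction m with
  | zero =>
      intro _
      rw [show ((0 : Nat) : Int) = 0 by norm_num, PySem.List.pyRange_one_eq_nil le_rfl]
      simp
  | succ m ih =>
      intro hm
      have hmlt : m < a.length := hm
      have h1 : PySem.List.pyRange 0 ((m + 1 : Nat) : Int) 1
          = PySem.List.pyRange 0 (m : Int) 1 ++ [(m : Int)] := by
        have : ((m + 1 : Nat) : Int) = (m : Int) + 1 := by push_cast; ring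
        rw [this, PySem.List.pyRange_one_succ_right (by positivity)]
      rw [h1, List.foldl_append, ih (le_of_lt hmlt), List.range_succ, List.filterMap_append]
      simp only [List.foldl_cons, List.foldl_nil]
      have hget : PySem.List.pyGetD a (m : Int) 0 = a.getD m 0 := by
        simp [PySem.List.pyGetD_natCast]
      have hsl : PySem.List.slice a (some ((m : Int) + 1)) none = a.drop (m + 1) := by
        rw [show (m : Int) + 1 = ((m + 1 : Nat) : Int) by push_cast; ring,
            PySem.List.slice_from_natCast]
      set P := (List.range m).filterMap (gp a) with hP
      cases hidx : PySem.List.index? (a.drop (m + 1)) (a.getD m 0) with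
      | none =>
          have hgp : gp a m = none := by unfold gp; rw [hidx]
          have hmem : a.getD m 0 ∉ a.drop (m + 1) :=
            (PySem.List.index?_eq_none_iff _ _).mp hidx
          have hcon : (a.drop (m + 1)).contains (a.getD m 0) = false := by simpa using hmem
          simp only [stepA, hget, hsl, hcon, Bool.false_eq_true, if_false]
          simp [hgp]
      | some t =>
          have hgp : gp a m = some ((t : Int) + 1, a.getD m 0) := by unfold gp; rw [hidx]
          have hmem : a.getD m 0 ∈ a.drop (m + 1) := by
            have h := (PySem.List.index?_isSome_iff (xs := a.drop (m + 1))
              (v := a.getD m 0))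
            rw [hidx] at h
            simpa using h
          have hcon : (a.drop (m + 1)).contains (a.getD m 0) = true := by simpa using hmem
          have hmin : (PySem.List.min? (9999 :: P.map Prod.fst) (fun x => x)).getD 0
              = (P.foldl step_lt ((9999 : Int), -1)).1 := by
            rw [PySem.List.min?_id_cons, fold_lt_fst]
            simp [fmins, List.foldl_map]
          simp only [stepA, hget, hsl, hcon, if_true, hidx, Option.getD_some, hgp,
            List.filterMap_cons, List.filterMap_nil, List.foldl_append, List.foldl_cons,
            List.foldl_nil, List.map_append, List.map_cons, List.map_nil, hmin]
          refine Prod.ext ?_ ?_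
          · simp
          · show (if ((t : Int) + 1) < (P.foldl step_lt ((9999 : Int), -1)).1
                  then a.getD m 0 else (P.foldl step_lt ((9999 : Int), -1)).2)
              = (step_lt (P.foldl step_lt ((9999 : Int), -1)) ((t : Int) + 1, a.getD m 0)).2
            unfold step_lt
            split <;> simp_all

theorem A_char (a : List Int) :
    solution a = ((pgaps a).foldl step_lt ((9999 : Int), -1)).2 := by
  unfold solution pgaps
  rw [A_inv a a.length le_rfl]

theorem B_inv (a : List Int) : ∀ (j k : Nat), k + j = a.length →
    (((PySem.List.pyRange (k : Int) (a.length : Int) 1).reverse).foldl (stepB a)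
        (PySem.Dict.empty, 9998, -1)).2
      = ((List.range' k j).filterMap (gp a)).reverse.foldl step_le ((9998 : Int), -1)
    ∧ ∀ w, (((PySem.List.pyRange (k : Int) (a.length : Int) 1).reverse).foldl (stepB a)
        (PySem.Dict.empty, 9998, -1)).1.get? w
      = (PySem.List.index? (a.drop k) w).map (fun t => ((t + k : Nat) : Int)) := by
  intro j
  induction j with
  | zero =>
      intro k hk
      have hkl : k = a.length := by omega
      subst hkl
      rw [PySem.List.pyRange_one_eq_nil le_rfl]
      refine ⟨rfl, fun w => ?_⟩
      rw [List.drop_length]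
      rw [(PySem.List.index?_eq_none_iff _ _).mpr (by simp)]
      rfl
  | succ j ihj =>
      intro k hk
      have hkn : k < a.length := by omega
      have h1 : PySem.List.pyRange (k : Int) (a.length : Int) 1
          = (k : Int) :: PySem.List.pyRange ((k + 1 : Nat) : Int) (a.length : Int) 1 := by
        rw [show ((k + 1 : Nat) : Int) = (k : Int) + 1 by push_cast; ring]
        exact PySem.List.pyRange_one_cons (by exact_mod_cast hkn)
      rw [h1, List.reverse_cons, List.foldl_append, List.foldl_cons, List.foldl_nil]
      obtain ⟨ih2, ih1⟩ := ihj (k + 1) (by omega)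
      set S := ((PySem.List.pyRange ((k + 1 : Nat) : Int) (a.length : Int) 1).reverse).foldl
        (stepB a) (PySem.Dict.empty, 9998, -1) with hS
      have hget : PySem.List.pyGetD a (k : Int) 0 = a.getD k 0 := by
        simp [PySem.List.pyGetD_natCast]
      have hdropk : a.drop k = a.getD k 0 :: a.drop (k + 1) := by
        rw [List.drop_eq_getElem_cons hkn, List.getD_eq_getElem a 0 hkn]
      have hrange' : List.range' k (j + 1) = k :: List.range' (k + 1) j := List.range'_succ
      have hins : ∀ w, (S.1.insert (a.getD k 0) (k : Int)).get? w
          = (PySem.List.index? (a.drop k) w).map (fun t => ((t + k : Nat) : Int)) := by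
        intro w
        rw [PySem.Dict.get?_insert, hdropk]
        by_cases hw : w = a.getD k 0
        · subst hw
          rw [if_pos rfl, PySem.List.index?_cons_self]
          simp
        · rw [if_neg hw, PySem.List.index?_cons_of_ne _ (fun h => hw h.symm), ih1 w,
              Option.map_map]
          congr 1
          funext t
          simp only [Function.comp]
          push_cast
          ring
      cases hidx : PySem.List.index? (a.drop (k + 1)) (a.getD k 0) with
      | none =>
          have hcon : S.1.contains (a.getD k 0) = false := by
            rw [PySem.Dict.contains_eq_isSome_get?, ih1 (a.getD k 0), hidx]
            rfl
          have hgp : gp a k = none := by unfold gp; rw [hidx]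
          constructor
          · simp only [stepB, hget, hcon, Bool.false_eq_true, if_false]
            rw [hrange']
            simp [hgp, ih2]
          · intro w
            simp only [stepB, hget]
            exact hins w
      | some t =>
          have hgetS : S.1.get? (a.getD k 0) = some ((t + (k + 1) : Nat) : Int) := by
            rw [ih1, hidx]
            rfl
          have hcon : S.1.contains (a.getD k 0) = true := by
            rw [PySem.Dict.contains_eq_isSome_get?, hgetS]
            rfl
          have hgap : S.1.getD (a.getD k 0) 0 - (k : Int) = (t : Int) + 1 := by
            rw [PySem.Dict.getD_eq_get?_getD, hgetS]
            push_cast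
            simp
            ring
          have hgp : gp a k = some ((t : Int) + 1, a.getD k 0) := by unfold gp; rw [hidx]
          constructor
          · simp only [stepB, hget, hcon, if_true, hgap]
            rw [hrange']
            simp only [List.filterMap_cons, hgp, List.reverse_cons, List.foldl_append,
              List.foldl_cons, List.foldl_nil, ih2]
            unfold step_le
            rfl
          · intro w
            simp only [stepB, hget]
            exact hins w

theorem B_char (a : List Int) :
    solution_alt a = (((pgaps a).reverse).foldl step_le ((9998 : Int), -1)).2 := by
  unfold solution_alt pgaps
  have h := (B_inv a a.length 0 (by omega)).1
  rw [show ((0 : Nat) : Int) = 0 by norm_num] at h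
  rw [h, List.range_eq_range']

theorem combine (L : List (Int × Int)) (v : Int) :
    (L.foldl step_lt ((9999 : Int), v)).2 = ((L.reverse).foldl step_le ((9998 : Int), v)).2 := by
  rw [lt_snd, le_snd, List.reverse_reverse, fmins_reverse]
  have h98 : fmins L 9998 = min (fmins L 9999) 9998 := by
    rw [← fmins_min]; norm_num
  by_cases h : fmins L 9999 < 9999
  · rw [if_pos h]
    have : fmins L 9998 = fmins L 9999 := by rw [h98]; omega
    rw [this]
  · rw [if_neg h]
    have h9 : fmins L 9999 = 9999 := le_antisymm (fmins_le_init L 9999) (le_of_not_gt h)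
    have : fmins L 9998 = 9998 := by rw [h98, h9]; norm_num
    rw [this]
    refine (fv_default (fun q hq => ?_) v).symm
    have := fmins_le_mem L 9999 hq
    omega

-- ===== VERDICT (by name: the statement is the Claim_ definition above) =====
theorem solution_spec : Claim_equal_solution := by
  intro a _
  show solution a = solution_alt a
  rw [A_char, B_char, combine]
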